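-- pv_equiv track=rewrite | github.com/Yui0471/VRChat_Logmonitor | main.py | current_world
-- ===== SOURCE A (Python) =====
-- def current_world(data):
--     count = 0
--     worldcount = 0
--     for s in reversed(data):
--         if "Entering Room:" in s:
--             world = s # ついでにワールド名も取れる
--             break
--         count += 1 # 行番号をカウント
--
--     worldcount = len(data) - count -1
--
--     if worldcount == -1: # 起動したてでワールド情報がログに出力されていない場合
--         return None
--
--     worldname_num = world.find("Entering Room:") + 15
--     worldname = world[worldname_num :]
--
--     return worldcount, worldname
-- ===== SOURCE B (Python) =====
-- def current_world(data):
--     last = None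
--     for i, s in enumerate(data):
--         if "Entering Room:" in s:
--             last = (i, s)
--     if last is None:
--         return None
--     idx, line = last
--     return idx, line[line.find("Entering Room:") + 15:]
-- ===== Notes on version B (the rewrite author's own statement) =====
-- stated objective: alternative
-- what changed: Replaces the reversed-scan-with-break plus len-count-1 index arithmetic by a single forward enumerate pass that keeps the last matching (index, line) pair directly.
import Mathlib
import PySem

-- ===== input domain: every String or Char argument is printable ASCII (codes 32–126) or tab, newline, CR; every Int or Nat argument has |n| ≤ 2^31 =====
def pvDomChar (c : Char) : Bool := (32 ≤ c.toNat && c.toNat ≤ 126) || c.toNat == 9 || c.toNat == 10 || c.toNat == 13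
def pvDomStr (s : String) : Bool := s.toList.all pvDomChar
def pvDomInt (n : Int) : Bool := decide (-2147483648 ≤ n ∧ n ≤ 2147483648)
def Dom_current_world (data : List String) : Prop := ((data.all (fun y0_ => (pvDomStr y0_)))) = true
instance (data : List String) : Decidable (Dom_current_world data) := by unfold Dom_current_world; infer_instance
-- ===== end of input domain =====

-- B replaces A's reversed scan with break and len-count-1 arithmetic by one forward
-- enumerate pass keeping the last matching (index, line) pair; alternative decomposition, same cost.


-- ===== PORT A =====
-- 'for s in reversed(data): if "Entering Room:" in s: world = s; break; count += 1'
def pvALoop (l : List String) (count : Int) : Option String × Int :=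
  match l with
  | [] => (none, count)
  | s :: rest =>
    if PySem.Str.isIn "Entering Room:" s then (some s, count) else pvALoop rest (count + 1)

def current_world (data : List String) : Option (Int × String) :=
  let r := pvALoop data.reverse 0
  let worldcount : Int := (data.length : Int) - r.2 - 1
  if worldcount = -1 then none
  else
    match r.1 with
    | none => none  -- unreachable: when worldcount ≠ -1 the loop did break with 'world' set
    | some world =>
      let worldname_num := PySem.Str.find world "Entering Room:" + 15
      some (worldcount, PySem.Str.slice world (some worldname_num) none)

-- ===== PORT B =====
def pvBStep (acc : Option (Int × String)) (p : Int × String) : Option (Int × String) :=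
  if PySem.Str.isIn "Entering Room:" p.2 then some p else acc

def current_world_alt (data : List String) : Option (Int × String) :=
  match (PySem.List.enumerate data 0).foldl pvBStep none with
  | none => none
  | some (idx, line) =>
    some (idx, PySem.Str.slice line (some (PySem.Str.find line "Entering Room:" + 15)) none)

-- ===== PRECONDITION & SPEC =====
def Spec_current_world (data : List String) (out : Option (Int × String)) : Prop := out = current_world_alt data
instance (data : List String) (out : Option (Int × String)) : Decidable (Spec_current_world data out) := by unfold Spec_current_world; infer_instance

-- ===== CLAIM (what is proved, stated in full; the proofs are below) =====
def Claim_equal_current_world : Prop := ∀ (data : List String), Dom_current_world data → Spec_current_world data (current_world data)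

-- ===== LEMMAS AND PROOFS =====

lemma pvEnumerate_append {α : Type} (xs ys : List α) (s : Int) :
    PySem.List.enumerate (xs ++ ys) s
      = PySem.List.enumerate xs s ++ PySem.List.enumerate ys (s + xs.length) := by
  induction xs generalizing s with
  | nil => simp [PySem.List.enumerate]
  | cons x xs ih =>
    simp [PySem.List.enumerate_cons, ih (s + 1)]
    ring_nf

lemma pvALoop_shift (l : List String) (c : Int) :
    pvALoop l c = ((pvALoop l 0).1, c + (pvALoop l 0).2) := by
  induction l generalizing c with
  | nil => simp [pvALoop]
  | cons s rest ih =>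
    cases h : PySem.Str.isIn "Entering Room:" s
    · simp only [pvALoop, h, Bool.false_eq_true, if_false]
      rw [ih (c + 1), ih (0 + 1)]
      simp
      ring
    · simp only [pvALoop, h]
      simp

lemma pvInv (data : List String) :
    match pvALoop data.reverse 0 with
    | (none, c) =>
        c = (data.length : Int) ∧ (PySem.List.enumerate data 0).foldl pvBStep none = none
    | (some w, c) =>
        0 ≤ c ∧ c < (data.length : Int) ∧
        (PySem.List.enumerate data 0).foldl pvBStep none
          = some ((data.length : Int) - c - 1, w) := by
  induction data using List.reverseRecOn with
  | nil => simp [pvALoop, PySem.List.enumerate]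
  | append_singleton xs x ih =>
    rw [List.reverse_append]
    simp only [List.reverse_singleton, List.singleton_append]
    rw [pvEnumerate_append, List.foldl_append]
    simp only [PySem.List.enumerate, List.foldl_cons, List.foldl_nil]
    cases h : PySem.Str.isIn "Entering Room:" x
    · simp only [pvALoop, h, Bool.false_eq_true, if_false]
      rw [pvALoop_shift]
      rcases hA : pvALoop xs.reverse 0 with ⟨w?, c⟩
      rw [hA] at ih
      cases w? with
      | none =>
        simp only at ih ⊢
        refine ⟨?_, ?_⟩
        · rw [ih.1]; simp; omega
        · rw [ih.2]; simp only [pvBStep, h, Bool.false_eq_true, if_false]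
      | some w =>
        simp only at ih ⊢
        obtain ⟨h0, hlt, hfold⟩ := ih
        refine ⟨by omega, ?_, ?_⟩
        · simp only [List.length_append, List.length_singleton]
          push_cast
          omega
        · rw [hfold]
          simp only [pvBStep, h, Bool.false_eq_true, if_false,
            List.length_append, List.length_singleton]
          push_cast
          congr 2
          omega
    · simp only [pvALoop, h, if_true]
      refine ⟨le_refl 0, ?_, ?_⟩
      · simp only [List.length_append, List.length_singleton]
        push_cast
        omega
      · simp only [pvBStep, h, if_true, List.length_append, List.length_singleton]
        push_cast
        congr 2
        omega

-- ===== VERDICT (by name: the statement is the Claim_ definition above) =====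
theorem current_world_spec : Claim_equal_current_world := by
  intro data _
  unfold Spec_current_world current_world current_world_alt
  have H := pvInv data
  rcases hA : pvALoop data.reverse 0 with ⟨w?, c⟩
  rw [hA] at H
  cases w? with
  | none =>
    simp only at H ⊢
    rw [H.2]
    simp [H.1]
  | some w =>
    simp only at H ⊢
    rw [H.2.2]
    obtain ⟨h0, hlt, -⟩ := H
    have hne : (data.length : Int) - c - 1 ≠ -1 := by omega
    simp [hne]
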